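-- pv_equiv track=rewrite | github.com/DukeDukem/citrixMCP | .cursor/skills/sprinklr-email-automation/email_automation.py | _preformat_reply
-- ===== SOURCE A (Python) =====
-- def _preformat_reply(text: str) -> str:
--     """
--     Preformat the reply text before pasting into the editor.
--     Normalizes line endings, trims lines, and enforces consistent paragraph spacing
--     so the email displays correctly in TinyMCE (salutation, body, survey line, signature).
--     """
--     if not text:
--         return ""
--     # Normalize line endings
--     out = text.replace('\r\n', '\n').replace('\r', '\n')
--     # Trim each line (no trailing/leading spaces per line)
--     lines = [line.rstrip() for line in out.split('\n')]
--     # Rebuild: drop leading/trailing blank lines, collapse 3+ blank lines to 2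
--     rebuilt = []
--     prev_blank = False
--     blank_count = 0
--     for line in lines:
--         is_blank = (line.strip() == '')
--         if is_blank:
--             blank_count += 1
--             # Allow at most one blank line in a row (one empty line between paragraphs)
--             if blank_count <= 1:
--                 rebuilt.append('')
--             prev_blank = True
--         else:
--             blank_count = 0
--             rebuilt.append(line)
--             prev_blank = False
--     # Strip leading and trailing blank lines
--     while rebuilt and rebuilt[0].strip() == '':
--         rebuilt.pop(0)
--     while rebuilt and rebuilt[-1].strip() == '':
--         rebuilt.pop()
--     return '\n'.join(rebuilt)
-- ===== SOURCE B (Python) =====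
-- def _preformat_reply(text: str) -> str:
--     # Group non-blank (rstripped) lines into paragraphs; join paragraphs with one blank line.
--     lines = [l.rstrip() for l in text.replace('\r\n', '\n').replace('\r', '\n').split('\n')]
--     paragraphs = []
--     current = []
--     for line in lines:
--         if line:
--             current.append(line)
--         elif current:
--             paragraphs.append(current)
--             current = []
--     if current:
--         paragraphs.append(current)
--     return '\n\n'.join('\n'.join(p) for p in paragraphs)
-- ===== Notes on version B (the rewrite author's own statement) =====
-- stated objective: simpler
-- what changed: B groups the rstripped non-blank lines into paragraphs and joins the paragraphs with a single blank line, replacing A's stateful blank_count loop and its two pop-based boundary-trimming while loops.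
import Mathlib
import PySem

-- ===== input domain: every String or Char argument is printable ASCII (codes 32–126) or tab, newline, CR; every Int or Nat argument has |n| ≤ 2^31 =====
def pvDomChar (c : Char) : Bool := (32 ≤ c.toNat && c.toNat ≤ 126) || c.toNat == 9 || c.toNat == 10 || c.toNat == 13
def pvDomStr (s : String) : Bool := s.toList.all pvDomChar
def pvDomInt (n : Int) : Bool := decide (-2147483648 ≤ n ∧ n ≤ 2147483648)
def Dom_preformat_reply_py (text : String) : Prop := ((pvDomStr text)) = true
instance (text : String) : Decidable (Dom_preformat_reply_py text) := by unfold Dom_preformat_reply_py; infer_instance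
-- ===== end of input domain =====

-- B replaces A's stateful blank-count loop and the two pop-based trim loops by grouping
-- non-blank lines into paragraphs and joining the paragraphs with one blank line (simpler).

-- ===== PORT A =====
-- while rebuilt and rebuilt[0].strip() == '': rebuilt.pop(0)
def pvPopFrontBlanks : List String → List String
  | [] => []
  | l :: rest => if PySem.Str.strip l = "" then pvPopFrontBlanks rest else l :: rest

-- while rebuilt and rebuilt[-1].strip() == '': rebuilt.pop()   (structural form, from the front)
def pvPopBackBlanks : List String → List String
  | [] => []
  | l :: rest =>
    match pvPopBackBlanks rest with
    | [] => if PySem.Str.strip l = "" then [] else [l]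
    | r => l :: r

def preformat_reply_py (text : String) : String :=
  if text = "" then ""
  else
    let out := PySem.Str.replace (PySem.Str.replace text "\r\n" "\n") "\r" "\n"
    let lines := ((PySem.Str.split? out "\n").getD []).map (fun l => PySem.Str.rstrip l)
    let st := lines.foldl
      (fun (st : List String × Int) line =>
        if PySem.Str.strip line = "" then
          (if st.2 + 1 ≤ 1 then st.1 ++ [""] else st.1, st.2 + 1)
        else
          (st.1 ++ [line], 0)) ([], 0)
    PySem.Str.join "\n" (pvPopBackBlanks (pvPopFrontBlanks st.1))

-- ===== PORT B =====
def preformat_reply_py_alt (text : String) : String :=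
  let lines := ((PySem.Str.split? (PySem.Str.replace (PySem.Str.replace text "\r\n" "\n") "\r" "\n") "\n").getD []).map (fun l => PySem.Str.rstrip l)
  let st := lines.foldl
    (fun (st : List (List String) × List String) line =>
      if line ≠ "" then (st.1, st.2 ++ [line])
      else if st.2 ≠ [] then (st.1 ++ [st.2], []) else st) ([], [])
  let paragraphs := if st.2 ≠ [] then st.1 ++ [st.2] else st.1
  PySem.Str.join "\n\n" (paragraphs.map (fun p => PySem.Str.join "\n" p))

-- ===== PRECONDITION & SPEC =====
def Spec_preformat_reply_py (text : String) (out : String) : Prop := out = preformat_reply_py_alt text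
instance (text : String) (out : String) : Decidable (Spec_preformat_reply_py text out) := by unfold Spec_preformat_reply_py; infer_instance

-- ===== CLAIM (what is proved, stated in full; the proofs are below) =====
def Claim_equal_preformat_reply_py : Prop := ∀ (text : String), Dom_preformat_reply_py text → Spec_preformat_reply_py text (preformat_reply_py text)

-- ===== LEMMAS AND PROOFS =====

-- Proof-side reference functions.

-- A's loop collapses each run of blank lines to one '' (inb = "inside a blank run").
def pvCollapse : Bool → List String → List String
  | _, [] => []
  | inb, l :: ls =>
    if l = "" then (if inb then pvCollapse true ls else "" :: pvCollapse true ls)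
    else l :: pvCollapse false ls

-- Maximal runs of non-blank lines.
def pvGroups : List String → List (List String)
  | [] => []
  | l :: ls =>
    if l = "" then pvGroups ls
    else (l :: ls.takeWhile (fun x => decide (x ≠ ""))) :: pvGroups (ls.dropWhile (fun x => decide (x ≠ "")))
termination_by ls => ls.length
decreasing_by
  · simp
  · have h := List.length_dropWhile_le (fun x => decide (x ≠ "")) ls
    simp only [List.length_cons]
    omega

-- groups with a still-open first group cur
def pvGroupsOpen (cur : List String) (ls : List String) : List (List String) :=
  (cur ++ ls.takeWhile (fun x => decide (x ≠ ""))) :: pvGroups (ls.dropWhile (fun x => decide (x ≠ "")))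

-- intersperse a single blank line between groups
def pvInter : List (List String) → List String
  | [] => []
  | g :: gs => g ++ (if gs = [] then [] else "" :: pvInter gs)

lemma pvInter_cons (g : List String) (gs : List (List String)) :
    pvInter (g :: gs) = g ++ (if gs = [] then [] else "" :: pvInter gs) := rfl

-- unfolding equations
lemma pvCollapse_blank_true (ls : List String) :
    pvCollapse true ("" :: ls) = pvCollapse true ls := by
  simp [pvCollapse]

lemma pvCollapse_blank_false (ls : List String) :
    pvCollapse false ("" :: ls) = "" :: pvCollapse true ls := by
  simp [pvCollapse]

lemma pvCollapse_cons (b : Bool) (l : String) (ls : List String) (hl : l ≠ "") :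
    pvCollapse b (l :: ls) = l :: pvCollapse false ls := by
  cases b <;> simp [pvCollapse, hl]

lemma pvGroups_nil : pvGroups [] = [] := by
  rw [pvGroups]

lemma pvGroups_blank (ls : List String) : pvGroups ("" :: ls) = pvGroups ls := by
  rw [pvGroups, if_pos rfl]

lemma pvGroups_cons (l : String) (ls : List String) (hl : l ≠ "") :
    pvGroups (l :: ls)
      = (l :: ls.takeWhile (fun x => decide (x ≠ "")))
          :: pvGroups (ls.dropWhile (fun x => decide (x ≠ ""))) := by
  rw [pvGroups, if_neg hl]

lemma pvPopBack_cons (l : String) (rest : List String) :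
    pvPopBackBlanks (l :: rest)
      = match pvPopBackBlanks rest with
        | [] => if PySem.Str.strip l = "" then [] else [l]
        | r => l :: r := rfl

-- strip ∘ rstrip is null iff rstrip is null
lemma pv_rstrip_nil_iff (z : List Char) :
    PySem.Chars.rstrip z = [] ↔ ∀ c ∈ z, PySem.Chars.isspace c = true := by
  simp [PySem.Chars.rstrip, List.reverse_eq_nil_iff, List.dropWhile_eq_nil_iff]

lemma pv_chars_strip_rstrip (cs : List Char) :
    PySem.Chars.strip (PySem.Chars.rstrip cs) = [] ↔ PySem.Chars.rstrip cs = [] := by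
  constructor
  · intro h
    have hid : PySem.Chars.rstrip (PySem.Chars.rstrip cs) = PySem.Chars.rstrip cs := by
      simp [PySem.Chars.rstrip, List.reverse_reverse, List.dropWhile_idempotent]
    simp only [PySem.Chars.strip, PySem.Chars.lstrip] at h
    have h1 := (pv_rstrip_nil_iff _).1 h
    have h2 : ∀ c ∈ PySem.Chars.rstrip cs, PySem.Chars.isspace c = true := by
      intro c hc
      rw [← List.takeWhile_append_dropWhile (p := PySem.Chars.isspace) (l := PySem.Chars.rstrip cs)] at hc
      rcases List.mem_append.1 hc with h3 | h3
      · exact List.mem_takeWhile_imp h3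
      · exact h1 c h3
    rw [← hid]
    exact (pv_rstrip_nil_iff _).2 h2
  · intro h; rw [h]; rfl

lemma pv_strip_rstrip (s : String) :
    (PySem.Str.strip (PySem.Str.rstrip s) = "" ↔ PySem.Str.rstrip s = "") := by
  rw [← String.toList_inj (s₁ := PySem.Str.strip (PySem.Str.rstrip s)),
      ← String.toList_inj (s₁ := PySem.Str.rstrip s)]
  simpa [PySem.Str.toList_strip, PySem.Str.toList_rstrip] using pv_chars_strip_rstrip s.toList

-- A's fold computes pvCollapse
lemma pv_foldA (ls : List String) (acc : List String) (bc : Int) (hbc : 0 ≤ bc)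
    (H : ∀ l ∈ ls, (PySem.Str.strip l = "" ↔ l = "")) :
    (ls.foldl
      (fun (st : List String × Int) line =>
        if PySem.Str.strip line = "" then
          (if st.2 + 1 ≤ 1 then st.1 ++ [""] else st.1, st.2 + 1)
        else
          (st.1 ++ [line], 0)) (acc, bc)).1
    = acc ++ pvCollapse (decide (0 < bc)) ls := by
  induction ls generalizing acc bc with
  | nil => simp [pvCollapse]
  | cons l ls ih =>
    have Hl := H l (by simp)
    have Hr : ∀ x ∈ ls, (PySem.Str.strip x = "" ↔ x = "") := fun x hx => H x (by simp [hx])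
    rw [List.foldl_cons]
    by_cases hsl : PySem.Str.strip l = ""
    · have hl : l = "" := Hl.1 hsl
      subst hl
      have h1 : (0:Int) < bc + 1 := by omega
      rw [if_pos hsl]
      by_cases h0 : (0:Int) < bc
      · have hn : ¬ (bc + 1 ≤ 1) := by omega
        rw [if_neg hn]
        rw [ih acc (bc + 1) (by omega) Hr]
        simp only [h0, h1, decide_true]
        rw [pvCollapse]
        simp
      · have hy : bc + 1 ≤ 1 := by omega
        rw [if_pos hy]
        rw [ih (acc ++ [""]) (bc + 1) (by omega) Hr]
        have hb : decide (0 < bc) = false := by simpa using h0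
        have hb1 : decide ((0:Int) < bc + 1) = true := by simpa using h1
        rw [hb, hb1]
        rw [pvCollapse]
        simp [List.append_assoc]
    · have hl : l ≠ "" := fun h => hsl (Hl.2 h)
      rw [if_neg hsl]
      rw [ih (acc ++ [l]) 0 (by omega) Hr]
      rw [pvCollapse]
      simp [hl, List.append_assoc]

-- B's fold computes pvGroups
lemma pv_foldB (ls : List String) (ps : List (List String)) (cur : List String) :
    (let r := ls.foldl
      (fun (st : List (List String) × List String) line =>
        if line ≠ "" then (st.1, st.2 ++ [line])
        else if st.2 ≠ [] then (st.1 ++ [st.2], []) else st) (ps, cur);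
     if r.2 ≠ [] then r.1 ++ [r.2] else r.1)
    = ps ++ (if cur = [] then pvGroups ls else pvGroupsOpen cur ls) := by
  induction ls generalizing ps cur with
  | nil =>
    by_cases hc : cur = []
    · simp [hc, pvGroups]
    · simp [hc, pvGroupsOpen, pvGroups]
  | cons l ls ih =>
    simp only [List.foldl_cons]
    by_cases hl : l = ""
    · subst hl
      rw [if_neg (by simp : ¬ (("" : String) ≠ ""))]
      by_cases hc : cur = []
      · subst hc
        rw [if_neg (by simp : ¬ (([] : List String) ≠ []))]
        rw [ih ps []]
        rw [if_pos rfl, if_pos rfl, pvGroups_blank]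
      · rw [if_pos hc]
        rw [ih (ps ++ [cur]) []]
        rw [if_pos rfl, if_neg hc]
        rw [pvGroupsOpen]
        have h1 : List.takeWhile (fun x => decide (x ≠ "")) ("" :: ls) = [] := by simp
        have h2 : List.dropWhile (fun x => decide (x ≠ "")) ("" :: ls) = "" :: ls := by simp
        rw [h1, h2, List.append_nil, pvGroups_blank]
        simp [List.append_assoc]
    · rw [if_pos hl]
      rw [ih ps (cur ++ [l])]
      rw [if_neg (by simp : ¬ (cur ++ [l] = []))]
      have h1 : List.takeWhile (fun x => decide (x ≠ "")) (l :: ls)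
          = l :: List.takeWhile (fun x => decide (x ≠ "")) ls := by simp [hl]
      have h2 : List.dropWhile (fun x => decide (x ≠ "")) (l :: ls)
          = List.dropWhile (fun x => decide (x ≠ "")) ls := by simp [hl]
      by_cases hc : cur = []
      · subst hc
        rw [if_pos rfl, pvGroups_cons l ls hl, pvGroupsOpen]
        simp
      · rw [if_neg hc, pvGroupsOpen, pvGroupsOpen, h1, h2]
        simp [List.append_assoc]

lemma pv_popFront_collapse_true (ls : List String)
    (H : ∀ l ∈ ls, (PySem.Str.strip l = "" ↔ l = "")) :
    pvPopFrontBlanks (pvCollapse true ls) = pvCollapse true ls := by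
  induction ls with
  | nil => rfl
  | cons l ls ih =>
    have Hl := H l (by simp)
    have Hr : ∀ x ∈ ls, (PySem.Str.strip x = "" ↔ x = "") := fun x hx => H x (by simp [hx])
    by_cases hl : l = ""
    · subst hl
      rw [pvCollapse_blank_true]
      exact ih Hr
    · have hsl : ¬ PySem.Str.strip l = "" := fun h => hl (Hl.1 h)
      rw [pvCollapse_cons true l ls hl, pvPopFrontBlanks, if_neg hsl]

lemma pv_popFront_collapse (ls : List String)
    (H : ∀ l ∈ ls, (PySem.Str.strip l = "" ↔ l = "")) :
    pvPopFrontBlanks (pvCollapse false ls) = pvCollapse true ls := by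
  cases ls with
  | nil => rfl
  | cons l ls =>
    have Hl := H l (by simp)
    have Hr : ∀ x ∈ ls, (PySem.Str.strip x = "" ↔ x = "") := fun x hx => H x (by simp [hx])
    by_cases hl : l = ""
    · subst hl
      rw [pvCollapse_blank_false, pvCollapse_blank_true, pvPopFrontBlanks,
        if_pos (by decide : PySem.Str.strip "" = "")]
      exact pv_popFront_collapse_true ls Hr
    · have hsl : ¬ PySem.Str.strip l = "" := fun h => hl (Hl.1 h)
      rw [pvCollapse_cons false l ls hl, pvCollapse_cons true l ls hl,
        pvPopFrontBlanks, if_neg hsl]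

lemma pv_popBack_append (xs ys : List String) :
    pvPopBackBlanks (xs ++ ys) =
      if pvPopBackBlanks ys = [] then pvPopBackBlanks xs else xs ++ pvPopBackBlanks ys := by
  induction xs with
  | nil =>
    by_cases h : pvPopBackBlanks ys = []
    · rw [List.nil_append, if_pos h, h]
      rfl
    · rw [List.nil_append, if_neg h, List.nil_append]
  | cons x xs ih =>
    rw [List.cons_append, pvPopBack_cons, ih]
    by_cases h : pvPopBackBlanks ys = []
    · rw [if_pos h, if_pos h, pvPopBack_cons]
    · rw [if_neg h, if_neg h]
      rcases List.exists_cons_of_ne_nil h with ⟨a, as, ha⟩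
      rw [ha]
      cases xs <;> simp

lemma pv_popBack_fix (xs : List String) (h : ∀ x ∈ xs, ¬ PySem.Str.strip x = "") :
    pvPopBackBlanks xs = xs := by
  induction xs with
  | nil => rfl
  | cons x xs ih =>
    have hx := h x (by simp)
    have ih' := ih (fun y hy => h y (by simp [hy]))
    rw [pvPopBack_cons, ih']
    cases xs with
    | nil => simp [hx]
    | cons b bs => rfl

lemma pv_collapse_false_prefix (t r : List String) (ht : ∀ x ∈ t, x ≠ "") :
    pvCollapse false (t ++ r) = t ++ pvCollapse false r := by
  induction t with
  | nil => rfl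
  | cons x t ih =>
    have hx := ht x (by simp)
    rw [List.cons_append, pvCollapse_cons false x (t ++ r) hx,
      ih (fun y hy => ht y (by simp [hy])), List.cons_append]

lemma pv_groups_ne_nil (ls : List String) : ∀ g ∈ pvGroups ls, g ≠ [] := by
  induction ls using pvGroups.induct with
  | case1 => simp [pvGroups]
  | case2 ls ih =>
    rw [pvGroups_blank]
    exact ih
  | case3 l ls hl ih =>
    rw [pvGroups_cons l ls hl]
    intro g hg
    rcases List.mem_cons.1 hg with h | h
    · subst h; simp
    · exact ih g h

lemma pv_inter_ne_nil (gs : List (List String)) (h : gs ≠ []) (hg : ∀ g ∈ gs, g ≠ []) :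
    pvInter gs ≠ [] := by
  cases gs with
  | nil => exact absurd rfl h
  | cons g gs =>
    have hne := hg g (by simp)
    simp only [pvInter]
    intro hcon
    rcases List.append_eq_nil_iff.1 hcon with ⟨h1, _⟩
    exact hne h1

-- main A-side lemma: trim-after-collapse is the blank-line intersperse of the groups
lemma pv_popBack_collapse (ls : List String)
    (H : ∀ l ∈ ls, (PySem.Str.strip l = "" ↔ l = "")) :
    pvPopBackBlanks (pvCollapse true ls) = pvInter (pvGroups ls) := by
  induction ls using pvGroups.induct with
  | case1 =>
    rw [pvGroups_nil]
    rfl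
  | case2 ls ih =>
    have Hr : ∀ x ∈ ls, (PySem.Str.strip x = "" ↔ x = "") := fun x hx => H x (by simp [hx])
    rw [pvCollapse_blank_true, pvGroups_blank]
    exact ih Hr
  | case3 l ls hl ih =>
    have Hl := H l (by simp)
    have Hr : ∀ x ∈ ls, (PySem.Str.strip x = "" ↔ x = "") := fun x hx => H x (by simp [hx])
    have hsl : ¬ PySem.Str.strip l = "" := fun h => hl (Hl.1 h)
    set t := ls.takeWhile (fun x => decide (x ≠ "")) with ht
    set r := ls.dropWhile (fun x => decide (x ≠ "")) with hr
    have htr : t ++ r = ls := List.takeWhile_append_dropWhile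
    have htn : ∀ x ∈ t, x ≠ "" := by
      intro x hx
      simpa using List.mem_takeWhile_imp hx
    have hts : ∀ x ∈ l :: t, ¬ PySem.Str.strip x = "" := by
      intro x hx
      rcases List.mem_cons.1 hx with h | h
      · subst h; exact hsl
      · have hxl : x ∈ ls := by
          rw [← htr]; exact List.mem_append_left _ h
        exact fun hc => (htn x h) ((H x (by simp [hxl])).1 hc)
    have Hdrop : ∀ x ∈ r, (PySem.Str.strip x = "" ↔ x = "") := by
      intro x hx
      have : x ∈ ls := by rw [← htr]; exact List.mem_append_right _ hx
      exact Hr x this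
    have hcoll : pvCollapse true (l :: ls) = (l :: t) ++ pvCollapse false r := by
      rw [pvCollapse_cons true l ls hl, ← htr, pv_collapse_false_prefix t r htn]
      simp
    rw [hcoll, pvGroups_cons l ls hl, ← ht, ← hr]
    have ihr := ih Hdrop
    cases hrc : r with
    | nil =>
      have hcn : pvCollapse false ([] : List String) = [] := rfl
      rw [hcn, List.append_nil, pv_popBack_fix (l :: t) hts, pvGroups_nil]
      simp [pvInter_cons]
    | cons r0 r' =>
      have hr0 : r0 = "" := by
        have hh := List.head?_dropWhile_not (fun x => decide (x ≠ "")) ls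
        rw [← hr, hrc] at hh
        simpa using hh
      subst hr0
      rw [pvCollapse_blank_false, pv_popBack_append, pvGroups_blank]
      rw [hrc, pvCollapse_blank_true, pvGroups_blank] at ihr
      have hback0 : pvPopBackBlanks ("" :: pvCollapse true r') =
          match pvInter (pvGroups r') with
          | [] => []
          | rr => "" :: rr := by
        rw [pvPopBack_cons, ihr]
        cases pvInter (pvGroups r') with
        | nil => simp [show PySem.Str.strip "" = "" from by decide]
        | cons a as => rfl
      cases hgc : pvGroups r' with
      | nil =>
        have hz : pvPopBackBlanks ("" :: pvCollapse true r') = [] := by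
          rw [hback0, hgc]
          rfl
        rw [hz, if_pos rfl, pv_popBack_fix (l :: t) hts]
        simp [pvInter_cons]
      | cons g gs =>
        have hin : pvInter (pvGroups r') ≠ [] := by
          rw [hgc]
          exact pv_inter_ne_nil _ (by simp) (by rw [← hgc]; exact pv_groups_ne_nil r')
        have hb : pvPopBackBlanks ("" :: pvCollapse true r') = "" :: pvInter (pvGroups r') := by
          rw [hback0]
          rcases List.exists_cons_of_ne_nil hin with ⟨i, is, hi⟩
          rw [hi]
        rw [hb, if_neg (by simp)]
        simp [pvInter_cons, hgc]

lemma pv_chars_join_append (sep : List Char) (xs ys : List (List Char)) (hx : xs ≠ []) (hy : ys ≠ []) :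
    PySem.Chars.join sep (xs ++ ys) = PySem.Chars.join sep xs ++ sep ++ PySem.Chars.join sep ys := by
  induction xs with
  | nil => exact absurd rfl hx
  | cons x xs ih =>
    cases xs with
    | nil =>
      cases ys with
      | nil => exact absurd rfl hy
      | cons y ys' =>
        rw [List.singleton_append, PySem.Chars.join_cons_cons, PySem.Chars.join_singleton]
    | cons x2 xs' =>
      have ih' := ih (by simp)
      rw [List.cons_append] at ih'
      rw [List.cons_append, PySem.Chars.join_cons_cons, List.cons_append,
          PySem.Chars.join_cons_cons, ih']
      simp [List.append_assoc]

-- joining interspersed groups with '\n' = joining the per-group joins with '\n\n'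
lemma pv_join_inter (gs : List (List String)) (hg : ∀ g ∈ gs, g ≠ []) :
    PySem.Str.join "\n" (pvInter gs) = PySem.Str.join "\n\n" (gs.map (fun p => PySem.Str.join "\n" p)) := by
  induction gs with
  | nil => rfl
  | cons g gs ih =>
    have hg0 : g ≠ [] := hg g (by simp)
    have hgr : ∀ x ∈ gs, x ≠ [] := fun x hx => hg x (by simp [hx])
    cases gs with
    | nil =>
      rw [← String.toList_inj]
      simp [pvInter_cons, PySem.Str.toList_join, PySem.Chars.join_singleton]
    | cons g2 rest =>
      have ih' := ih hgr
      have hinter : pvInter (g2 :: rest) ≠ [] := pv_inter_ne_nil _ (by simp) hgr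
      rcases List.exists_cons_of_ne_nil hinter with ⟨i, is, hi⟩
      rw [← String.toList_inj]
      rw [pvInter_cons, if_neg (by simp : ¬ (g2 :: rest = []))]
      rw [PySem.Str.toList_join, PySem.Str.toList_join]
      have htoe : ("" : String).toList = [] := rfl
      simp only [List.map_append, List.map_cons, htoe]
      rw [pv_chars_join_append ("\n" : String).toList (g.map String.toList)
            ([] :: (pvInter (g2 :: rest)).map String.toList)
            (by simpa using hg0) (by simp)]
      rw [hi, List.map_cons, PySem.Chars.join_cons_cons]
      have hM : PySem.Chars.join ("\n" : String).toList (i.toList :: is.map String.toList)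
          = PySem.Chars.join ("\n\n" : String).toList
              ((PySem.Str.join "\n" g2).toList
                :: (rest.map (fun p => PySem.Str.join "\n" p)).map String.toList) := by
        have h1 := ih'
        rw [← String.toList_inj] at h1
        rw [PySem.Str.toList_join, PySem.Str.toList_join, hi] at h1
        simpa only [List.map_cons] using h1
      rw [hM, PySem.Chars.join_cons_cons]
      have hsep : ("\n\n" : String).toList = ("\n" : String).toList ++ ("\n" : String).toList := by decide
      rw [hsep, PySem.Str.toList_join]
      simp [List.append_assoc]

-- ===== VERDICT (by name: the statement is the Claim_ definition above) =====
theorem preformat_reply_py_spec : Claim_equal_preformat_reply_py := by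
  intro text _
  unfold Spec_preformat_reply_py preformat_reply_py preformat_reply_py_alt
  dsimp only
  by_cases htext : text = ""
  · subst htext; decide
  · rw [if_neg htext]
    set lines := ((PySem.Str.split? (PySem.Str.replace (PySem.Str.replace text "\r\n" "\n") "\r" "\n") "\n").getD []).map (fun l => PySem.Str.rstrip l) with hlines
    have H : ∀ l ∈ lines, (PySem.Str.strip l = "" ↔ l = "") := by
      intro l hl
      rw [hlines] at hl
      rcases List.mem_map.1 hl with ⟨s, _, hs⟩
      subst hs
      exact pv_strip_rstrip s
    have hA := pv_foldA lines [] 0 (by omega) H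
    have hB := pv_foldB lines [] []
    simp only at hA hB
    rw [hA]
    rw [List.nil_append, show (decide ((0:Int) < 0)) = false from rfl,
      pv_popFront_collapse lines H, pv_popBack_collapse lines H]
    simp only [if_true, List.nil_append] at hB
    rw [hB]
    exact pv_join_inter (pvGroups lines) (pv_groups_ne_nil lines)
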